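-- pv_equiv track=rewrite | github.com/TieuLongPhan/SynKit | synkit/CRN/crn_theory.py | _minimal_subsets
-- ===== SOURCE A (Python) =====
-- from typing import Dict, List, Optional, Sequence, Set, Tuple
--
-- def _minimal_subsets(sets: List[Set[int]]) -> List[Set[int]]:
--     """
--     Extract minimal sets under inclusion from a list of sets.
--
--     :param sets: List of sets.
--     :type sets: List[Set[int]]
--     :returns: List of inclusion-minimal sets.
--     :rtype: List[Set[int]]
--     """
--     minimal: List[Set[int]] = []
--     for S in sets:
--         if any(S > T for T in sets):
--             continue
--         minimal.append(S)
--     # remove duplicates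
--     unique: List[Set[int]] = []
--     for S in minimal:
--         if not any(S == T for T in unique):
--             unique.append(S)
--     return unique
-- ===== SOURCE B (Python) =====
-- from typing import List, Set
--
--
-- def _minimal_subsets(sets: List[Set[int]]) -> List[Set[int]]:
--     # Deduplicate first (first-appearance order), then sweep the unique sets in
--     # ascending-cardinality order: any strict subset of S is strictly smaller, so
--     # only already-seen sets in the sweep can witness non-minimality of S.
--     unique: List[Set[int]] = []
--     for S in sets:
--         if not any(S == U for U in unique):
--             unique.append(S)
--     by_size = sorted(unique, key=len)
--     seen: List[Set[int]] = []
--     keep: List[Set[int]] = []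
--     for S in by_size:
--         if not any(T < S for T in seen):
--             keep.append(S)
--         seen.append(S)
--     return [S for S in unique if any(S == M for M in keep)]
-- ===== Notes on version B (the rewrite author's own statement) =====
-- stated objective: alternative
-- what changed: B deduplicates the input first, sorts the unique sets by cardinality ascending and does one sweep in which only previously swept (hence no larger) sets are tested as strict subsets, then re-emits survivors in first-appearance order, instead of A's full quadratic any(S > T) scan over the whole input followed by deduplication.
import Mathlib
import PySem

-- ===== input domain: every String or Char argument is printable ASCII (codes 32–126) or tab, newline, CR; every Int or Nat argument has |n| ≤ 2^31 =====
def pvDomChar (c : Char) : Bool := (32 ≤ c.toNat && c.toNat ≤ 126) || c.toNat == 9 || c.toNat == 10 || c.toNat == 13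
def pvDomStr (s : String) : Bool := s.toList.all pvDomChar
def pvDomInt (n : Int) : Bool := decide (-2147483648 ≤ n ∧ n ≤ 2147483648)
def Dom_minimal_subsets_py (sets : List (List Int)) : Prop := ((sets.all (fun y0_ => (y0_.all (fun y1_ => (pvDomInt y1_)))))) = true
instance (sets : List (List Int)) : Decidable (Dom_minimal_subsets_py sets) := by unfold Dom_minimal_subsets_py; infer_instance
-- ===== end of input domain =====

-- B deduplicates first and then sweeps the unique sets in ascending-cardinality order
-- (a strict subset is strictly smaller, so only already-swept sets can witness
-- non-minimality), instead of A's quadratic superset scan over the whole input list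
-- followed by deduplication; objective: alternative decomposition.

-- ===== PORT A =====
-- Python set operators on the distinct-elements-list representation: `a <= b`, `a < b`, `a == b`.
def pySetLE (a b : List Int) : Bool := a.all (fun x => x ∈ b)
def pySetLT (a b : List Int) : Bool := pySetLE a b && !(pySetLE b a)
def pySetEq (a b : List Int) : Bool := pySetLE a b && pySetLE b a

-- `for S in sets: if any(S > T for T in sets): continue; minimal.append(S)`
def minLoopA (sets : List (List Int)) : List (List Int) → List (List Int)
  | [] => []
  | S :: rest =>
      if sets.any (fun T => pySetLT T S) then minLoopA sets rest
      else S :: minLoopA sets rest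

-- `for S in minimal: if not any(S == T for T in unique): unique.append(S)`
def uniqLoopA (acc : List (List Int)) : List (List Int) → List (List Int)
  | [] => acc
  | S :: rest =>
      if acc.any (fun T => pySetEq S T) then uniqLoopA acc rest
      else uniqLoopA (acc ++ [S]) rest

def minimal_subsets_py (sets : List (List Int)) : List (List Int) :=
  uniqLoopA [] (minLoopA sets sets)

-- ===== PORT B =====
-- Python set operators for B (same semantics as Python's `<=`, `<`, `==` on sets).
def bSetLE (a b : List Int) : Bool := a.all (fun x => x ∈ b)
def bSetLT (a b : List Int) : Bool := bSetLE a b && !(bSetLE b a)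
def bSetEq (a b : List Int) : Bool := bSetLE a b && bSetLE b a

-- first dedup loop of B
def dedupLoopB (acc : List (List Int)) : List (List Int) → List (List Int)
  | [] => acc
  | S :: rest =>
      if acc.any (fun U => bSetEq S U) then dedupLoopB acc rest
      else dedupLoopB (acc ++ [S]) rest

-- `len(S)` on a Python set is its cardinality = number of distinct elements (exact).
def bCard (S : List Int) : Int := (S.dedup.length : Int)

-- the sweep loop over `by_size`, carrying `seen`
def sweepB (seen : List (List Int)) : List (List Int) → List (List Int)
  | [] => []
  | S :: rest =>
      if seen.any (fun T => bSetLT T S) then sweepB (seen ++ [S]) rest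
      else S :: sweepB (seen ++ [S]) rest

def minimal_subsets_py_alt (sets : List (List Int)) : List (List Int) :=
  let unique := dedupLoopB [] sets
  let bySize := PySem.List.sorted unique bCard false
  let keep := sweepB [] bySize
  unique.filter (fun S => keep.any (fun M => bSetEq S M))

-- ===== PRECONDITION & SPEC =====
def Spec_minimal_subsets_py (sets : List (List Int)) (out : List (List Int)) : Prop := out = minimal_subsets_py_alt sets
instance (sets : List (List Int)) (out : List (List Int)) : Decidable (Spec_minimal_subsets_py sets out) := by unfold Spec_minimal_subsets_py; infer_instance

-- ===== CLAIM (what is proved, stated in full; the proofs are below) =====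
def Claim_equal_minimal_subsets_py : Prop := ∀ (sets : List (List Int)), Dom_minimal_subsets_py sets → Spec_minimal_subsets_py sets (minimal_subsets_py sets)

-- ===== LEMMAS AND PROOFS =====

theorem bSetLT_eq (a b : List Int) : bSetLT a b = pySetLT a b := rfl
theorem bSetEq_eq (a b : List Int) : bSetEq a b = pySetEq a b := rfl

theorem pySetLE_iff (a b : List Int) : pySetLE a b = true ↔ ∀ x ∈ a, x ∈ b := by
  simp [pySetLE]

theorem pySetLE_refl (a : List Int) : pySetLE a a = true := by
  simp [pySetLE_iff]

theorem pySetLE_trans {a b c : List Int} (h1 : pySetLE a b = true) (h2 : pySetLE b c = true) :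
    pySetLE a c = true := by
  rw [pySetLE_iff] at *
  exact fun x hx => h2 x (h1 x hx)

theorem pySetEq_refl (a : List Int) : pySetEq a a = true := by
  simp [pySetEq, pySetLE_refl]

theorem pySetEq_symm {a b : List Int} (h : pySetEq a b = true) : pySetEq b a = true := by
  simp [pySetEq] at *; exact h.symm

theorem pySetEq_false_symm {a b : List Int} (h : pySetEq a b = false) : pySetEq b a = false := by
  cases hc : pySetEq b a
  · rfl
  · rw [pySetEq_symm hc] at h; cases h

theorem pySetLT_iff (a b : List Int) :
    pySetLT a b = true ↔ pySetLE a b = true ∧ pySetLE b a = false := by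
  simp [pySetLT]

theorem pySetLT_irrefl (a : List Int) : pySetLT a a = false := by
  simp [pySetLT, pySetLE_refl]

-- congruence of the strict-subset test under set equality (both arguments)
theorem pySetLT_congr_left {a a' b : List Int} (h : pySetEq a a' = true) :
    pySetLT a b = pySetLT a' b := by
  simp only [pySetEq, Bool.and_eq_true] at h
  simp only [pySetLT]
  rcases h with ⟨h1, h2⟩
  by_cases hab : pySetLE a b = true
  · have : pySetLE a' b = true := pySetLE_trans h2 hab
    simp [hab, this]
    by_cases hba : pySetLE b a = true
    · have : pySetLE b a' = true := pySetLE_trans hba h1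
      simp [hba, this]
    · have : pySetLE b a' = false := by
        by_contra hc
        have : pySetLE b a' = true := by revert hc; cases pySetLE b a' <;> simp
        exact hba (pySetLE_trans this h2)
      simp [Bool.eq_false_iff.mpr hba, this]
  · have hab' : pySetLE a b = false := by revert hab; cases pySetLE a b <;> simp
    have : pySetLE a' b = false := by
      by_contra hc
      have hc : pySetLE a' b = true := by revert hc; cases pySetLE a' b <;> simp
      exact hab (pySetLE_trans h1 hc)
    simp [hab', this]

theorem pySetLT_congr_right {a b b' : List Int} (h : pySetEq b b' = true) :
    pySetLT a b = pySetLT a b' := by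
  simp only [pySetEq, Bool.and_eq_true] at h
  simp only [pySetLT]
  rcases h with ⟨h1, h2⟩
  by_cases hab : pySetLE a b = true
  · have : pySetLE a b' = true := pySetLE_trans hab h1
    simp [hab, this]
    by_cases hba : pySetLE b a = true
    · have : pySetLE b' a = true := pySetLE_trans h2 hba
      simp [hba, this]
    · have : pySetLE b' a = false := by
        by_contra hc
        have hc : pySetLE b' a = true := by revert hc; cases pySetLE b' a <;> simp
        exact hba (pySetLE_trans h1 hc)
      simp [Bool.eq_false_iff.mpr hba, this]
  · have hab' : pySetLE a b = false := by revert hab; cases pySetLE a b <;> simp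
    have : pySetLE a b' = false := by
      by_contra hc
      have hc : pySetLE a b' = true := by revert hc; cases pySetLE a b' <;> simp
      exact hab (pySetLE_trans hc h2)
    simp [hab', this]

-- strict subset ⇒ strictly smaller cardinality
theorem pySetLT_card {a b : List Int} (h : pySetLT a b = true) :
    a.dedup.length < b.dedup.length := by
  rw [pySetLT_iff] at h
  rcases h with ⟨hle, hnot⟩
  rw [pySetLE_iff] at hle
  have hsub : a.toFinset ⊆ b.toFinset := by
    intro x hx
    rw [List.mem_toFinset] at *
    exact hle x hx
  have hne : a.toFinset ≠ b.toFinset := by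
    intro he
    have : pySetLE b a = true := by
      rw [pySetLE_iff]
      intro x hx
      have : x ∈ a.toFinset := he ▸ (List.mem_toFinset.mpr hx)
      exact List.mem_toFinset.mp this
    simp [this] at hnot
  have := Finset.card_lt_card (lt_of_le_of_ne hsub hne)
  simpa [List.card_toFinset] using this

-- ===== A-side characterisation =====

theorem minLoopA_eq_filter (sets l : List (List Int)) :
    minLoopA sets l = l.filter (fun S => !(sets.any (fun T => pySetLT T S))) := by
  induction l with
  | nil => rfl
  | cons S rest ih =>
      by_cases h : sets.any (fun T => pySetLT T S) = true
      · simp [minLoopA, h, ih, List.filter]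
      · have h' : sets.any (fun T => pySetLT T S) = false := by
          revert h; cases sets.any (fun T => pySetLT T S) <;> simp
        simp [minLoopA, h', ih, List.filter]

-- dedup commutes with a filter whose predicate respects set equality
theorem uniqLoopA_filter (p : List Int → Bool)
    (hp : ∀ a b, pySetEq a b = true → p a = p b) :
    ∀ (l acc : List (List Int)),
      (uniqLoopA acc l).filter p = uniqLoopA (acc.filter p) (l.filter p) := by
  intro l
  induction l with
  | nil => intro acc; rfl
  | cons S rest ih =>
      intro acc
      by_cases h : acc.any (fun T => pySetEq S T) = true
      · rcases List.any_eq_true.mp h with ⟨a, ha, hEq⟩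
        by_cases hpS : p S = true
        · have hpa : p a = true := (hp S a hEq) ▸ hpS
          have : (acc.filter p).any (fun T => pySetEq S T) = true :=
            List.any_eq_true.mpr ⟨a, List.mem_filter.mpr ⟨ha, hpa⟩, hEq⟩
          simp [uniqLoopA, h, ih, List.filter, hpS, this]
        · have hpS' : p S = false := by revert hpS; cases p S <;> simp
          simp [uniqLoopA, h, ih, List.filter, hpS']
      · have h' : acc.any (fun T => pySetEq S T) = false := by
          revert h; cases acc.any (fun T => pySetEq S T) <;> simp
        have hsub : (acc.filter p).any (fun T => pySetEq S T) = false := by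
          rw [List.any_eq_false] at h' ⊢
          exact fun a ha => h' a (List.mem_filter.mp ha).1
        by_cases hpS : p S = true
        · simp [uniqLoopA, h', ih, List.filter, hpS, hsub, List.filter_append]
        · have hpS' : p S = false := by revert hpS; cases p S <;> simp
          simp [uniqLoopA, h', ih, List.filter, hpS', List.filter_append]

-- ===== dedup structure lemmas (shared shape of uniqLoopA / dedupLoopB) =====

theorem dedupLoopB_eq_uniqLoopA : ∀ (l acc : List (List Int)), dedupLoopB acc l = uniqLoopA acc l := by
  intro l
  induction l with
  | nil => intro acc; rfl
  | cons S rest ih => intro acc; simp [dedupLoopB, uniqLoopA, bSetEq_eq, ih]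

theorem uniqLoopA_mem_of_acc : ∀ (l acc : List (List Int)) (a : List Int),
    a ∈ acc → a ∈ uniqLoopA acc l := by
  intro l
  induction l with
  | nil => intro acc a ha; simpa [uniqLoopA] using ha
  | cons S rest ih =>
      intro acc a ha
      by_cases h : acc.any (fun T => pySetEq S T) = true
      · simp only [uniqLoopA, h, if_pos]; exact ih acc a ha
      · have h' : acc.any (fun T => pySetEq S T) = false := by
          revert h; cases acc.any (fun T => pySetEq S T) <;> simp
        simp only [uniqLoopA, h', Bool.false_eq_true, if_neg, not_false_iff]
        exact ih (acc ++ [S]) a (List.mem_append.mpr (Or.inl ha))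

theorem uniqLoopA_subset : ∀ (l acc : List (List Int)) (a : List Int),
    a ∈ uniqLoopA acc l → a ∈ acc ∨ a ∈ l := by
  intro l
  induction l with
  | nil => intro acc a ha; exact Or.inl (by simpa [uniqLoopA] using ha)
  | cons S rest ih =>
      intro acc a ha
      by_cases h : acc.any (fun T => pySetEq S T) = true
      · simp only [uniqLoopA, h, if_pos] at ha
        rcases ih acc a ha with h1 | h1
        · exact Or.inl h1
        · exact Or.inr (List.mem_cons_of_mem _ h1)
      · have h' : acc.any (fun T => pySetEq S T) = false := by
          revert h; cases acc.any (fun T => pySetEq S T) <;> simp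
        simp only [uniqLoopA, h', Bool.false_eq_true, if_neg, not_false_iff] at ha
        rcases ih (acc ++ [S]) a ha with h1 | h1
        · rcases List.mem_append.mp h1 with h2 | h2
          · exact Or.inl h2
          · simp at h2; exact Or.inr (by simp [h2])
        · exact Or.inr (List.mem_cons_of_mem _ h1)

theorem uniqLoopA_covers : ∀ (l acc : List (List Int)) (T : List Int), T ∈ l →
    ∃ T' ∈ uniqLoopA acc l, pySetEq T T' = true := by
  intro l
  induction l with
  | nil => intro acc T hT; cases hT
  | cons S rest ih =>
      intro acc T hT
      by_cases h : acc.any (fun T => pySetEq S T) = true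
      · simp only [uniqLoopA, h, if_pos]
        rcases List.mem_cons.mp hT with rfl | hT'
        · rcases List.any_eq_true.mp h with ⟨a, ha, hEq⟩
          exact ⟨a, uniqLoopA_mem_of_acc rest acc a ha, hEq⟩
        · exact ih acc T hT'
      · have h' : acc.any (fun T => pySetEq S T) = false := by
          revert h; cases acc.any (fun T => pySetEq S T) <;> simp
        simp only [uniqLoopA, h', Bool.false_eq_true, if_neg, not_false_iff]
        rcases List.mem_cons.mp hT with rfl | hT'
        · exact ⟨T, uniqLoopA_mem_of_acc rest (acc ++ [T]) T (by simp), pySetEq_refl T⟩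
        · exact ih (acc ++ [S]) T hT'

theorem uniqLoopA_pairwise : ∀ (l acc : List (List Int)),
    acc.Pairwise (fun a b => pySetEq a b = false) →
    (uniqLoopA acc l).Pairwise (fun a b => pySetEq a b = false) := by
  intro l
  induction l with
  | nil => intro acc h; simpa [uniqLoopA] using h
  | cons S rest ih =>
      intro acc hacc
      by_cases h : acc.any (fun T => pySetEq S T) = true
      · simp only [uniqLoopA, h, if_pos]; exact ih acc hacc
      · have h' : acc.any (fun T => pySetEq S T) = false := by
          revert h; cases acc.any (fun T => pySetEq S T) <;> simp
        simp only [uniqLoopA, h', Bool.false_eq_true, if_neg, not_false_iff]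
        apply ih
        rw [List.pairwise_append]
        refine ⟨hacc, by simp, ?_⟩
        intro a ha b hb
        rw [List.mem_singleton] at hb; subst hb
        rw [List.any_eq_false] at h'
        have hS := h' a ha
        rw [Bool.not_eq_true] at hS
        exact pySetEq_false_symm hS

theorem pairwise_ne_of_pairwise_neq {l : List (List Int)}
    (h : l.Pairwise (fun a b => pySetEq a b = false)) : l.Nodup := by
  refine h.imp ?_
  intro a b hab he
  subst he
  simp [pySetEq_refl a] at hab

-- ===== sweep characterisation =====

theorem sweepB_subset : ∀ (l seen : List (List Int)) (a : List Int),
    a ∈ sweepB seen l → a ∈ l := by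
  intro l
  induction l with
  | nil => intro seen a ha; simp [sweepB] at ha
  | cons S rest ih =>
      intro seen a ha
      by_cases h : seen.any (fun T => bSetLT T S) = true
      · simp only [sweepB, h, if_pos] at ha
        exact List.mem_cons_of_mem _ (ih (seen ++ [S]) a ha)
      · have h' : seen.any (fun T => bSetLT T S) = false := by
          revert h; cases seen.any (fun T => bSetLT T S) <;> simp
        simp only [sweepB, h', Bool.false_eq_true, if_neg, not_false_iff] at ha
        rcases List.mem_cons.mp ha with rfl | ha'
        · exact List.mem_cons_self
        · exact List.mem_cons_of_mem _ (ih (seen ++ [S]) a ha')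

theorem sweepB_mem_iff : ∀ (l seen : List (List Int)) (S : List Int),
    S ∈ l → l.Nodup →
    l.Pairwise (fun a b => a.dedup.length ≤ b.dedup.length) →
    (S ∈ sweepB seen l ↔ ∀ T, (T ∈ seen ∨ T ∈ l) → pySetLT T S = false) := by
  intro l
  induction l with
  | nil => intro seen S hS; cases hS
  | cons X rest ih =>
      intro seen S hS hnd hpw
      have hndr : rest.Nodup := hnd.of_cons
      have hpwr : rest.Pairwise (fun a b => a.dedup.length ≤ b.dedup.length) := hpw.of_cons
      have hXrest : ∀ T ∈ rest, X.dedup.length ≤ T.dedup.length := by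
        intro T hT; exact (List.pairwise_cons.mp hpw).1 T hT
      rcases List.mem_cons.mp hS with rfl | hSrest
      · -- S = X, the head
        by_cases h : seen.any (fun T => bSetLT T S) = true
        · have h2 : S ∉ sweepB (seen ++ [S]) rest := by
            intro hc
            exact (List.nodup_cons.mp hnd).1 (sweepB_subset rest (seen ++ [S]) S hc)
          simp only [sweepB, h, if_pos]
          constructor
          · intro hc; exact absurd hc h2
          · intro hall
            rcases List.any_eq_true.mp h with ⟨T, hT, hLT⟩
            rw [bSetLT_eq] at hLT
            have := hall T (Or.inl hT)
            simp [hLT] at this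
        · have h' : seen.any (fun T => bSetLT T S) = false := by
            revert h; cases seen.any (fun T => bSetLT T S) <;> simp
          simp only [sweepB, h', Bool.false_eq_true, if_neg, not_false_iff]
          constructor
          · intro _ T hT
            rcases hT with hT | hT
            · rw [List.any_eq_false] at h'
              have h2 := h' T hT
              rw [Bool.not_eq_true, bSetLT_eq] at h2
              exact h2
            · rcases List.mem_cons.mp hT with hTX | hT'
              · subst hTX; exact pySetLT_irrefl _
              · cases hc : pySetLT T _
                · rfl
                · have hlt := pySetLT_card hc
                  have := hXrest T hT'
                  omega
          · intro _; exact List.mem_cons_self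
      · -- S in the tail
        have hSX : S ≠ X := by
          intro he; subst he
          exact (List.nodup_cons.mp hnd).1 hSrest
        have iha := ih (seen ++ [X]) S hSrest hndr hpwr
        have regroup : (∀ T, (T ∈ seen ++ [X] ∨ T ∈ rest) → pySetLT T S = false) ↔
            (∀ T, (T ∈ seen ∨ T ∈ X :: rest) → pySetLT T S = false) := by
          constructor
          · intro hall T hT
            apply hall
            rcases hT with hT | hT
            · exact Or.inl (List.mem_append.mpr (Or.inl hT))
            · rcases List.mem_cons.mp hT with rfl | hT'
              · exact Or.inl (by simp)
              · exact Or.inr hT'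
          · intro hall T hT
            apply hall
            rcases hT with hT | hT
            · rcases List.mem_append.mp hT with hT' | hT'
              · exact Or.inl hT'
              · simp at hT'; subst hT'; exact Or.inr List.mem_cons_self
            · exact Or.inr (List.mem_cons_of_mem _ hT)
        by_cases h : seen.any (fun T => bSetLT T X) = true
        · simp only [sweepB, h, if_pos]
          exact iha.trans regroup
        · have h' : seen.any (fun T => bSetLT T X) = false := by
            revert h; cases seen.any (fun T => bSetLT T X) <;> simp
          simp only [sweepB, h', Bool.false_eq_true, if_neg, not_false_iff]
          rw [List.mem_cons]
          constructor
          · intro hc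
            rcases hc with rfl | hc
            · exact absurd rfl hSX
            · exact (regroup.mp (iha.mp hc))
          · intro hall
            exact Or.inr (iha.mpr (regroup.mpr hall))

-- ===== main proof =====

theorem main_eq (sets : List (List Int)) :
    minimal_subsets_py sets = minimal_subsets_py_alt sets := by
  classical
  set p : List Int → Bool := fun S => !(sets.any (fun T => pySetLT T S)) with hp
  have hpcongr : ∀ a b, pySetEq a b = true → p a = p b := by
    intro a b hab
    simp only [hp]
    congr 1
    exact List.any_congr rfl (fun T => pySetLT_congr_right hab)
  -- A-side: A = filter p over the deduped input
  have hA : minimal_subsets_py sets = (uniqLoopA [] sets).filter p := by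
    rw [minimal_subsets_py, minLoopA_eq_filter]
    rw [show (sets.filter fun S => !sets.any fun T => pySetLT T S) = sets.filter p from rfl]
    rw [show ([] : List (List Int)) = List.filter p [] from rfl]
    exact (uniqLoopA_filter p hpcongr sets []).symm
  -- B-side setup
  set unique := uniqLoopA [] sets with huniq
  have hBunique : dedupLoopB [] sets = unique := dedupLoopB_eq_uniqLoopA sets []
  set srt := PySem.List.sorted unique bCard false with hsrt
  have hperm : srt.Perm unique := PySem.List.sorted_perm ..
  have hpwEq : unique.Pairwise (fun a b => pySetEq a b = false) :=
    uniqLoopA_pairwise sets [] (by simp)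
  have hnd : unique.Nodup := pairwise_ne_of_pairwise_neq hpwEq
  have hndsrt : srt.Nodup := hperm.nodup_iff.mpr hnd
  have hpwsrt : srt.Pairwise (fun a b => a.dedup.length ≤ b.dedup.length) := by
    have := PySem.List.sorted_pairwise (xs := unique) (key := bCard)
    refine this.imp ?_
    intro a b hab
    simpa [bCard] using hab
  -- membership in `keep` for S ∈ unique is exactly p S
  have hmemsets : ∀ S ∈ unique, S ∈ sets := by
    intro S hS
    rcases uniqLoopA_subset sets [] S (huniq ▸ hS) with h | h
    · cases h
    · exact h
  have key : ∀ S ∈ unique, (sweepB [] srt).any (fun M => bSetEq S M) = p S := by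
    intro S hSu
    have hSsrt : S ∈ srt := hperm.mem_iff.mpr hSu
    have hiff := sweepB_mem_iff srt [] S hSsrt hndsrt hpwsrt
    have hkeepS : (sweepB [] srt).any (fun M => bSetEq S M) = true ↔ S ∈ sweepB [] srt := by
      constructor
      · intro h
        rcases List.any_eq_true.mp h with ⟨M, hM, hEq⟩
        rw [bSetEq_eq] at hEq
        have hMu : M ∈ unique := hperm.mem_iff.mp (sweepB_subset srt [] M hM)
        -- S and M are set-equal elements of the pairwise-distinct `unique`, so S = M
        have : S = M := by
          by_contra hne
          have hsymm : Symmetric (fun a b : List Int => pySetEq a b = false) :=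
            fun a b h => pySetEq_false_symm h
          have hfalse := hpwEq.forall hsymm hSu hMu hne
          rw [hEq] at hfalse; cases hfalse
        subst this; exact hM
      · intro h
        exact List.any_eq_true.mpr ⟨S, h, by rw [bSetEq_eq]; exact pySetEq_refl S⟩
    have hdom : (∀ T, (T ∈ ([] : List (List Int)) ∨ T ∈ srt) → pySetLT T S = false) ↔
        (∀ T ∈ sets, pySetLT T S = false) := by
      constructor
      · intro hall T hT
        rcases uniqLoopA_covers sets [] T hT with ⟨T', hT'u, hEq⟩
        have hT'srt : T' ∈ srt := hperm.mem_iff.mpr (huniq ▸ hT'u)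
        have := hall T' (Or.inr hT'srt)
        rw [pySetLT_congr_left hEq]
        exact this
      · intro hall T hT
        rcases hT with hT | hT
        · cases hT
        · exact hall T (hmemsets T (hperm.mem_iff.mp hT))
    by_cases hP : p S = true
    · rw [hP]
      apply hkeepS.mpr
      apply hiff.mpr
      rw [hdom]
      intro T hT
      simp only [hp, Bool.not_eq_true'] at hP
      rw [List.any_eq_false] at hP
      have h2 := hP T hT
      rw [Bool.not_eq_true] at h2
      exact h2
    · have hP' : p S = false := by revert hP; cases p S <;> simp
      rw [hP']
      by_contra hc
      have hc : (sweepB [] srt).any (fun M => bSetEq S M) = true := by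
        revert hc; cases (sweepB [] srt).any (fun M => bSetEq S M) <;> simp
      have := hdom.mp (hiff.mp (hkeepS.mp hc))
      simp only [hp, Bool.not_eq_false'] at hP'
      rcases List.any_eq_true.mp hP' with ⟨T, hT, hLT⟩
      have := this T hT
      simp [hLT] at this
  -- conclude
  rw [hA]
  show (uniqLoopA [] sets).filter p = minimal_subsets_py_alt sets
  rw [minimal_subsets_py_alt]
  simp only [hBunique]
  exact (List.filter_congr (fun S hS => (key S hS))).symm

-- ===== VERDICT (by name: the statement is the Claim_ definition above) =====
theorem minimal_subsets_py_spec : Claim_equal_minimal_subsets_py := by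
  intro sets _
  unfold Spec_minimal_subsets_py
  exact main_eq sets
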